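-- pv_equiv track=rewrite | github.com/GrahamStrickland/epi_tests | ch05/tests/test_dutch_national_flag_four_values.py | is_partitioned
-- ===== SOURCE A (Python) =====
-- from typing import List
--
-- def is_partitioned(A: List[int]) -> bool:
--     j = 0
--     for _ in range(4):
--         if j >= len(A):
--             break
--         val = A[j]
--         while j < len(A) and A[j] == val:
--             j += 1
--
--     return j == len(A)
-- ===== SOURCE B (Python) =====
-- from typing import List
--
--
-- def is_partitioned(A: List[int]) -> bool:
--     # At most 4 equal-value runs <=> at most 3 adjacent value changes.
--     return sum(x != y for x, y in zip(A, A[1:])) <= 3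
-- ===== Notes on version B (the rewrite author's own statement) =====
-- stated objective: idiomatic
-- what changed: Replaced the run-skipping index loop (outer for over 4 runs with an inner while advancing j) by a single flat pass counting adjacent value changes with zip/sum and comparing the count to 3.
import Mathlib
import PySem

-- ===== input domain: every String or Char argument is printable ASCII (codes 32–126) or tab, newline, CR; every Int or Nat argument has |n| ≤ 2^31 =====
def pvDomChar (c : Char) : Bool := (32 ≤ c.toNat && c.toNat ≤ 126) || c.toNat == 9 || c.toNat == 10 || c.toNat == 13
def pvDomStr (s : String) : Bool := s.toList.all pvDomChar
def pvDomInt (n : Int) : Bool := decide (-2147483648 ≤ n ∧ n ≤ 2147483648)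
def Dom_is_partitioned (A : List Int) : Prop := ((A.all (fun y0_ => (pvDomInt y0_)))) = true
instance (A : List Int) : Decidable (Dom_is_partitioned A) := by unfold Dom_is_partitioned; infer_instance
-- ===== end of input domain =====

-- B replaces A's run-skipping index loop by one flat zip pass counting adjacent changes (idiomatic).

-- ===== PORT A =====
-- inner 'while j < len(A) and A[j] == val: j += 1'
def pvWhile (A : List Int) (val : Int) (j : Nat) : Nat :=
  if h : j < A.length ∧ A.getD j 0 = val then pvWhile A val (j + 1) else j
termination_by A.length - j
decreasing_by omega

-- 'for _ in range(4): if j >= len(A): break; val = A[j]; while …'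
-- (the break is rendered as keeping j unchanged once j ≥ len(A): the body then does nothing)
def is_partitioned (A : List Int) : Bool :=
  decide ((List.range 4).foldl
    (fun j _ => if A.length ≤ j then j else pvWhile A (A.getD j 0) j) 0 = A.length)

-- ===== PORT B =====
-- 'sum(x != y for x, y in zip(A, A[1:])) <= 3'
def is_partitioned_alt (A : List Int) : Bool :=
  decide (((A.zip (PySem.List.slice A (some 1) none)).map
    (fun p => if p.1 ≠ p.2 then (1 : Int) else 0)).sum ≤ 3)

-- ===== PRECONDITION & SPEC =====
def Spec_is_partitioned (A : List Int) (out : Bool) : Prop := out = is_partitioned_alt A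
instance (A : List Int) (out : Bool) : Decidable (Spec_is_partitioned A out) := by unfold Spec_is_partitioned; infer_instance

-- ===== CLAIM (what is proved, stated in full; the proofs are below) =====
def Claim_equal_is_partitioned : Prop := ∀ (A : List Int), Dom_is_partitioned A → Spec_is_partitioned A (is_partitioned A)

-- ===== LEMMAS AND PROOFS =====

-- number of adjacent value changes
def pvChanges : List Int → Nat
  | [] => 0
  | [_] => 0
  | a :: b :: t => (if a = b then 0 else 1) + pvChanges (b :: t)

-- drop one leading run
def pvStep : List Int → List Int
  | [] => []
  | a :: t => t.dropWhile (fun x => x = a)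

-- the body of A's outer loop, named for the proofs (definitionally A's lambda)
def pvF (A : List Int) (j : Nat) : Nat :=
  if A.length ≤ j then j else pvWhile A (A.getD j 0) j

lemma pvWhile_eq (A : List Int) (val : Int) (j : Nat) :
    pvWhile A val j = j + ((A.drop j).takeWhile (fun x => x = val)).length := by
  fun_induction pvWhile A val j with
  | case1 j h ih =>
      obtain ⟨hj, hv⟩ := h
      rw [ih, List.drop_eq_getElem_cons hj, List.takeWhile_cons]
      simp only [List.getD_eq_getElem?_getD, List.getElem?_eq_getElem hj, Option.getD_some] at hv
      simp only [hv, decide_true, if_true, List.length_cons]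
      omega
  | case2 j h =>
      rcases Nat.lt_or_ge j A.length with hj | hj
      · have hv : ¬ A.getD j 0 = val := fun hv => h ⟨hj, hv⟩
        rw [List.drop_eq_getElem_cons hj, List.takeWhile_cons]
        simp only [List.getD_eq_getElem?_getD, List.getElem?_eq_getElem hj, Option.getD_some] at hv
        simp [hv]
      · simp [List.drop_eq_nil_of_le hj]

lemma drop_takeWhile_length (l : List Int) (p : Int → Bool) :
    l.drop (l.takeWhile p).length = l.dropWhile p := by
  induction l with
  | nil => rfl
  | cons a t ih => cases h : p a <;> simp [h, ih]

-- one iteration of the outer loop, in suffix form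
lemma pvOuter_step (A s : List Int) (hd : A.drop (A.length - s.length) = s)
    (hle : s.length ≤ A.length) :
    pvF A (A.length - s.length) = A.length - (pvStep s).length
    ∧ A.drop (A.length - (pvStep s).length) = pvStep s
    ∧ (pvStep s).length ≤ A.length := by
  match s with
  | [] => simp [pvStep, pvF] at *
  | a :: t =>
      set j := A.length - (a :: t).length with hjdef
      have hjlt : j < A.length := by
        have h0 : 0 < (a :: t).length := by simp
        omega
      have hval : A.getD j 0 = a := by
        have h0 : (A.drop j)[0]'(by rw [hd]; simp) = a := by simp [hd]
        rw [List.getElem_drop] at h0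
        simpa [List.getD_eq_getElem?_getD, List.getElem?_eq_getElem hjlt] using h0
      have hnotle : ¬ A.length ≤ j := by omega
      rw [pvF, if_neg hnotle, hval, pvWhile_eq, hd]
      have hstep : pvStep (a :: t) = (a :: t).dropWhile (fun x => x = a) := by
        simp [pvStep]
      set m := ((a :: t).takeWhile (fun x => x = a)).length with hm
      have hml : m ≤ (a :: t).length := by
        rw [hm]; exact (List.takeWhile_prefix _).length_le
      have hlen : m + (pvStep (a :: t)).length = (a :: t).length := by
        rw [hstep, ← drop_takeWhile_length, ← hm, List.length_drop]
        omega
      have hj' : j + m = A.length - (pvStep (a :: t)).length := by omega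
      refine ⟨hj', ?_, by omega⟩
      rw [← hj']
      have hdd : List.drop (j + m) A = List.drop m (List.drop j A) := by
        rw [List.drop_drop, Nat.add_comm]
      rw [hdd, hd, hm, drop_takeWhile_length, ← hstep]

lemma pvStep_nil : pvStep [] = [] := rfl

lemma is_partitioned_eq_step (A : List Int) :
    is_partitioned A = decide (pvStep (pvStep (pvStep (pvStep A))) = []) := by
  have h1 := pvOuter_step A A (by simp) (le_refl _)
  have h2 := pvOuter_step A _ h1.2.1 h1.2.2
  have h3 := pvOuter_step A _ h2.2.1 h2.2.2
  have h4 := pvOuter_step A _ h3.2.1 h3.2.2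
  simp only [Nat.sub_self] at h1
  have hfold : is_partitioned A = decide (pvF A (pvF A (pvF A (pvF A 0))) = A.length) := rfl
  rw [hfold, h1.1, h2.1, h3.1, h4.1]
  have hle4 := h4.2.2
  rw [decide_eq_decide]
  constructor
  · intro h
    have : (pvStep (pvStep (pvStep (pvStep A)))).length = 0 := by omega
    exact List.length_eq_zero_iff.mp this
  · intro h
    rw [h]
    simp

lemma pvChanges_step (a : Int) (t : List Int) :
    pvChanges (a :: t) =
      if pvStep (a :: t) = [] then 0 else 1 + pvChanges (pvStep (a :: t)) := by
  induction t with
  | nil => simp [pvChanges, pvStep]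
  | cons b t' ih =>
      by_cases hb : b = a
      · subst hb
        have h1 : pvChanges (b :: b :: t') = pvChanges (b :: t') := by simp [pvChanges]
        have h2 : pvStep (b :: b :: t') = pvStep (b :: t') := by
          simp [pvStep]
        rw [h1, h2, ih]
      · have h2 : pvStep (a :: b :: t') = b :: t' := by
          simp [pvStep, hb]
        rw [h2]
        simp [pvChanges]
        omega

lemma pvStep_iter_nil (k : Nat) : pvStep^[k] [] = [] := by
  induction k with
  | zero => rfl
  | succ k ih => rw [Function.iterate_succ_apply, pvStep_nil, ih]

lemma pvStep_iter_iff : ∀ (k : Nat) (l : List Int), l ≠ [] →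
    (pvStep^[k] l = [] ↔ pvChanges l + 1 ≤ k) := by
  intro k
  induction k with
  | zero => intro l hl; simpa using hl
  | succ k ih =>
      intro l hl
      obtain ⟨a, t, rfl⟩ := List.exists_cons_of_ne_nil hl
      rw [Function.iterate_succ_apply]
      by_cases hs : pvStep (a :: t) = []
      · rw [hs, pvStep_iter_nil]
        have : pvChanges (a :: t) = 0 := by rw [pvChanges_step, if_pos hs]
        simp [this]
      · rw [ih _ hs]
        have : pvChanges (a :: t) = 1 + pvChanges (pvStep (a :: t)) := by
          rw [pvChanges_step, if_neg hs]
        omega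

lemma pvSum_eq_changes (A : List Int) :
    ((A.zip A.tail).map (fun p => if p.1 ≠ p.2 then (1 : Int) else 0)).sum
      = (pvChanges A : Nat) := by
  induction A with
  | nil => simp [pvChanges]
  | cons a t ih =>
      cases t with
      | nil => simp [pvChanges]
      | cons b t' =>
          have hz : (a :: b :: t').zip (a :: b :: t').tail
              = (a, b) :: ((b :: t').zip (b :: t').tail) := by simp
          rw [hz, List.map_cons, List.sum_cons, ih]
          by_cases hab : a = b
          · simp [pvChanges, hab]
          · simp only [pvChanges, hab, if_false, ne_eq, not_false_eq_true, if_true]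
            push_cast
            ring

lemma alt_eq_changes (A : List Int) :
    is_partitioned_alt A = decide (pvChanges A ≤ 3) := by
  unfold is_partitioned_alt
  rw [PySem.List.slice_from_one, pvSum_eq_changes, decide_eq_decide]
  omega

-- ===== VERDICT (by name: the statement is the Claim_ definition above) =====
theorem is_partitioned_spec : Claim_equal_is_partitioned := by
  intro A _
  unfold Spec_is_partitioned
  rw [is_partitioned_eq_step, alt_eq_changes]
  rcases eq_or_ne A [] with rfl | hne
  · rfl
  · have h4 : pvStep (pvStep (pvStep (pvStep A))) = pvStep^[4] A := by
      simp [Function.iterate_succ_apply']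
    rw [h4, decide_eq_decide, pvStep_iter_iff 4 A hne]
    omega
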